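-- pv_equiv track=rewrite | github.com/luxcas213/pruebas-proyecto | modelo/matrix.py | triangulo
-- ===== SOURCE A (Python) =====
-- def triangulo(n):
--     x = [[0 for _ in range(n)] for _ in range(n)]
--     for i in range(n):
--         for j in range(n):
--             if i <= n//2 and j <= i and j >= n//2 - i:
--                 x[i][j] = 1
--             elif i > n//2 and j >= i - n//2 and j <= n - i + n//2 - 1:
--                 x[i][j] = 1
--     return x
-- ===== SOURCE B (Python) =====
-- def triangulo(n):
--     h = n // 2
--     rows = []
--     for i in range(n):
--         if i <= h:
--             lo = max(0, h - i)
--             hi = i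
--         else:
--             lo = i - h
--             hi = n - 1 - lo
--         ones = max(0, hi - lo + 1)
--         rows.append([0] * lo + [1] * ones + [0] * (n - lo - ones))
--     return rows
-- ===== Notes on version B (the rewrite author's own statement) =====
-- stated objective: alternative
-- what changed: B replaces the O(n^2) per-cell condition test with a per-row loop that derives the inclusive column interval of 1s in closed form and builds each row as zeros-ones-zeros by replication.
import Mathlib
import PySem

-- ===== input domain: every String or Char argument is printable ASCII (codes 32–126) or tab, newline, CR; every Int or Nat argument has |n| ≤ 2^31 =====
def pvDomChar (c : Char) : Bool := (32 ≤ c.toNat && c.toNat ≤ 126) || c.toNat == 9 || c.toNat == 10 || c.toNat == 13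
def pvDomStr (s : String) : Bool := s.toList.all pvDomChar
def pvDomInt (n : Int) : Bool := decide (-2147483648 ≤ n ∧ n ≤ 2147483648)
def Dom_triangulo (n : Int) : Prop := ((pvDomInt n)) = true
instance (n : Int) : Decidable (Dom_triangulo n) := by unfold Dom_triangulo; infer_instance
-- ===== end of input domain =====

-- B builds each row directly from the closed-form interval of 1s (zeros ++ ones ++ zeros)
-- instead of A's per-cell condition test over the whole matrix; same values everywhere.


-- ===== PORT A =====
def triangulo (n : Int) : List (List Int) :=
  let x := (PySem.List.pyRange 0 n 1).map (fun _ => (PySem.List.pyRange 0 n 1).map (fun _ => (0:Int)))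
  (PySem.List.pyRange 0 n 1).foldl (fun x i =>
    (PySem.List.pyRange 0 n 1).foldl (fun x j =>
      if i ≤ PySem.Int.floordiv n 2 ∧ j ≤ i ∧ j ≥ PySem.Int.floordiv n 2 - i then
        PySem.List.pySetD x i (PySem.List.pySetD (PySem.List.pyGetD x i []) j 1)
      else if i > PySem.Int.floordiv n 2 ∧ j ≥ i - PySem.Int.floordiv n 2 ∧ j ≤ n - i + PySem.Int.floordiv n 2 - 1 then
        PySem.List.pySetD x i (PySem.List.pySetD (PySem.List.pyGetD x i []) j 1)
      else x) x) x

-- ===== PORT B =====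
def triangulo_alt (n : Int) : List (List Int) :=
  let h := PySem.Int.floordiv n 2
  (PySem.List.pyRange 0 n 1).foldl (fun rows i =>
    let lohi := if i ≤ h then (max 0 (h - i), i) else (i - h, n - 1 - (i - h))
    let lo := lohi.1
    let ones := max 0 (lohi.2 - lo + 1)
    rows ++ [List.replicate lo.toNat 0 ++ List.replicate ones.toNat 1 ++
             List.replicate (n - lo - ones).toNat 0]) []

-- ===== PRECONDITION & SPEC =====
def Spec_triangulo (n : Int) (out : List (List Int)) : Prop := out = triangulo_alt n
instance (n : Int) (out : List (List Int)) : Decidable (Spec_triangulo n out) := by unfold Spec_triangulo; infer_instance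

-- ===== CLAIM =====
def Claim_equal_triangulo : Prop := ∀ (n : Int), Dom_triangulo n → Spec_triangulo n (triangulo n)

-- ===== LEMMAS AND PROOFS =====

-- A's cell condition (the two branches that write a 1, combined)
def tgC (n i j : Int) : Bool :=
  (i ≤ PySem.Int.floordiv n 2 && j ≤ i && PySem.Int.floordiv n 2 - i ≤ j) ||
  (PySem.Int.floordiv n 2 < i && i - PySem.Int.floordiv n 2 ≤ j && j ≤ n - i + PySem.Int.floordiv n 2 - 1)

-- inner-loop body of A, as one step on the matrix
def tgAstep (n i : Int) (x : List (List Int)) (j : Int) : List (List Int) :=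
  if i ≤ PySem.Int.floordiv n 2 ∧ j ≤ i ∧ j ≥ PySem.Int.floordiv n 2 - i then
    PySem.List.pySetD x i (PySem.List.pySetD (PySem.List.pyGetD x i []) j 1)
  else if i > PySem.Int.floordiv n 2 ∧ j ≥ i - PySem.Int.floordiv n 2 ∧ j ≤ n - i + PySem.Int.floordiv n 2 - 1 then
    PySem.List.pySetD x i (PySem.List.pySetD (PySem.List.pyGetD x i []) j 1)
  else x

-- the same step, acting on row i alone
def tgRstep (n i : Int) (r : List Int) (j : Int) : List Int :=
  if tgC n i j then PySem.List.pySetD r j 1 else r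

def tgRow (n i : Int) (r : List Int) : List Int :=
  (PySem.List.pyRange 0 n 1).foldl (tgRstep n i) r

def tgOstep (n : Int) (x : List (List Int)) (i : Int) : List (List Int) :=
  (PySem.List.pyRange 0 n 1).foldl (tgAstep n i) x

def tgZeroRow (n : Int) : List Int := (PySem.List.pyRange 0 n 1).map (fun _ => (0:Int))

-- B's row, named
def tgBrow (n i : Int) : List Int :=
  let h := PySem.Int.floordiv n 2
  let lohi := if i ≤ h then (max 0 (h - i), i) else (i - h, n - 1 - (i - h))
  let lo := lohi.1
  let ones := max 0 (lohi.2 - lo + 1)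
  List.replicate lo.toNat 0 ++ List.replicate ones.toNat 1 ++
    List.replicate (n - lo - ones).toNat 0

lemma tgAstep_eq (n i : Int) (x : List (List Int)) (j : Int) :
    tgAstep n i x j =
      if tgC n i j then PySem.List.pySetD x i (PySem.List.pySetD (PySem.List.pyGetD x i []) j 1) else x := by
  unfold tgAstep tgC
  simp only [Bool.or_eq_true, Bool.and_eq_true, decide_eq_true_eq]
  split_ifs <;> first | rfl | (exfalso; tauto)

lemma triangulo_eq_fold (n : Int) :
    triangulo n = (PySem.List.pyRange 0 n 1).foldl (tgOstep n)
      ((PySem.List.pyRange 0 n 1).map (fun _ => (PySem.List.pyRange 0 n 1).map (fun _ => (0:Int)))) := rfl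

lemma triangulo_alt_eq_map (n : Int) :
    triangulo_alt n = (PySem.List.pyRange 0 n 1).map (tgBrow n) := by
  unfold triangulo_alt tgBrow
  simpa using PySem.List.foldl_append_singleton_eq_map _ (PySem.List.pyRange 0 n 1) []

lemma pySetD_pyGetD_self (x : List (List Int)) (i : Int) (h0 : 0 ≤ i) (h1 : i < (x.length : Int)) :
    PySem.List.pySetD x i (PySem.List.pyGetD x i []) = x := by
  rw [PySem.List.pySetD_of_nonneg x _ h0, PySem.List.pyGetD_eq_getElem x [] h0 h1]
  exact List.set_getElem_self (by omega)

lemma pyGetD_pySetD_self (x : List (List Int)) (i : Int) (r : List Int)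
    (h0 : 0 ≤ i) (h1 : i < (x.length : Int)) :
    PySem.List.pyGetD (PySem.List.pySetD x i r) i [] = r := by
  rw [PySem.List.pySetD_of_nonneg x r h0,
      PySem.List.pyGetD_eq_getElem _ [] h0 (by simpa using h1)]
  exact List.getElem_set_self (by simp; omega)

lemma pySetD_pySetD (x : List (List Int)) (i : Int) (r r' : List Int) (h0 : 0 ≤ i) :
    PySem.List.pySetD (PySem.List.pySetD x i r) i r' = PySem.List.pySetD x i r' := by
  rw [PySem.List.pySetD_of_nonneg x r h0, PySem.List.pySetD_of_nonneg _ r' h0,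
      PySem.List.pySetD_of_nonneg x r' h0]
  exact List.set_set r

-- the inner fold over the matrix = setting row i to a fold over the row
lemma inner_eq_row (n i : Int) (js : List Int) (x : List (List Int))
    (h0 : 0 ≤ i) (h1 : i < (x.length : Int)) :
    js.foldl (tgAstep n i) x =
      PySem.List.pySetD x i (js.foldl (tgRstep n i) (PySem.List.pyGetD x i [])) := by
  induction js generalizing x with
  | nil => simp [pySetD_pyGetD_self x i h0 h1]
  | cons j js ih =>
    simp only [List.foldl_cons]
    rw [tgAstep_eq]
    by_cases hc : tgC n i j
    · rw [if_pos hc]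
      rw [ih _ (by rw [PySem.List.length_pySetD]; exact h1)]
      rw [pyGetD_pySetD_self x i _ h0 h1, pySetD_pySetD x i _ _ h0]
      simp only [tgRstep, if_pos hc]
    · rw [if_neg hc]
      rw [ih x h1]
      congr 1
      simp [tgRstep, hc]

lemma length_rfold (n i : Int) (js : List Int) (r : List Int) :
    (js.foldl (tgRstep n i) r).length = r.length := by
  induction js generalizing r with
  | nil => rfl
  | cons j js ih =>
    rw [List.foldl_cons, ih]
    unfold tgRstep
    split_ifs <;> simp [PySem.List.length_pySetD]

-- pointwise value of the row fold
lemma rfold_getElem (n i : Int) (js : List Int) (r : List Int) (k : Nat) (hk : k < r.length)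
    (hjs : ∀ j ∈ js, 0 ≤ j) :
    (js.foldl (tgRstep n i) r)[k]'(by rw [length_rfold]; exact hk) =
      if ((k : Int) ∈ js ∧ tgC n i (k : Int)) then 1 else r[k] := by
  induction js generalizing r with
  | nil => simp
  | cons j js ih =>
    have h0j : 0 ≤ j := hjs j (by simp)
    have hjs' : ∀ j' ∈ js, 0 ≤ j' := fun j' hm => hjs j' (by simp [hm])
    simp only [List.foldl_cons]
    have hk1 : k < (tgRstep n i r j).length := by
      unfold tgRstep; split_ifs <;> simp [PySem.List.length_pySetD, hk]
    rw [ih (tgRstep n i r j) hk1 hjs']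
    have hr1 : (tgRstep n i r j)[k]'hk1 = if j = (k:Int) ∧ tgC n i j then 1 else r[k] := by
      unfold tgRstep
      by_cases hc : tgC n i j
      · simp only [hc, ite_true, and_true]
        simp only [PySem.List.pySetD_of_nonneg r 1 h0j, List.getElem_set]
        by_cases hjk : j = (k:Int)
        · simp [hjk]
        · have : j.toNat ≠ k := by omega
          simp [this, hjk]
      · simp [hc]
    rw [hr1]
    simp only [List.mem_cons]
    by_cases hkj : (k:Int) = j
    · subst hkj
      split_ifs <;> tauto
    · have hn : ¬ (j = (k:Int)) := fun h => hkj h.symm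
      split_ifs <;> tauto

lemma length_afold (n i : Int) (js : List Int) (x : List (List Int)) :
    (js.foldl (tgAstep n i) x).length = x.length := by
  induction js generalizing x with
  | nil => rfl
  | cons j js ih =>
    rw [List.foldl_cons, ih, tgAstep_eq]
    split_ifs <;> simp [PySem.List.length_pySetD]

lemma length_ofold (n : Int) (is : List Int) (x : List (List Int)) :
    (is.foldl (tgOstep n) x).length = x.length := by
  induction is generalizing x with
  | nil => rfl
  | cons i is ih => rw [List.foldl_cons, ih]; unfold tgOstep; rw [length_afold]

-- pointwise value of the outer fold
lemma ofold_getElem (n : Int) (is : List Int) (x : List (List Int)) (k : Nat) (hk : k < x.length)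
    (his : ∀ i ∈ is, 0 ≤ i ∧ i < (x.length : Int)) (hnd : is.Nodup) :
    (is.foldl (tgOstep n) x)[k]'(by rw [length_ofold]; exact hk) =
      if (k : Int) ∈ is then tgRow n (k : Int) (x[k]) else x[k] := by
  induction is generalizing x with
  | nil => simp
  | cons i is ih =>
    obtain ⟨h0i, h1i⟩ := his i (by simp)
    have his' : ∀ i' ∈ is, 0 ≤ i' ∧ i' < (x.length : Int) := fun i' hm => his i' (by simp [hm])
    have hni : i ∉ is := (List.nodup_cons.mp hnd).1
    have hnd' : is.Nodup := (List.nodup_cons.mp hnd).2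
    simp only [List.foldl_cons]
    have hx1 : tgOstep n x i = PySem.List.pySetD x i (tgRow n i (PySem.List.pyGetD x i [])) := by
      unfold tgOstep tgRow
      exact inner_eq_row n i _ x h0i h1i
    simp only [hx1]
    have hlen1 : (PySem.List.pySetD x i (tgRow n i (PySem.List.pyGetD x i []))).length = x.length :=
      PySem.List.length_pySetD x i _
    rw [ih _ (by rw [hlen1]; exact hk) (by rw [hlen1]; exact his') hnd']
    have hget : (PySem.List.pySetD x i (tgRow n i (PySem.List.pyGetD x i [])))[k]'(by rw [hlen1]; exact hk)
        = if i = (k:Int) then tgRow n i (x[k]) else x[k] := by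
      simp only [PySem.List.pySetD_of_nonneg x _ h0i, List.getElem_set,
        PySem.List.pyGetD_eq_getElem x [] h0i h1i]
      by_cases hik : i = (k:Int)
      · simp [hik]
      · have : i.toNat ≠ k := by omega
        simp [this, hik]
    rw [hget]
    by_cases hmem : (k:Int) ∈ is
    · have hik : ¬ (i = (k:Int)) := by rintro rfl; exact hni hmem
      simp [hmem, hik]
    · by_cases hik : i = (k:Int)
      · subst hik
        simp [hmem]
      · simp only [List.mem_cons, hmem, or_false, if_neg hik]
        have : ¬ ((k:Int) = i) := fun h => hik h.symm
        simp [this]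

lemma h_char (n : Int) : 2 * PySem.Int.floordiv n 2 ≤ n ∧ n ≤ 2 * PySem.Int.floordiv n 2 + 1 := by
  have h1 := PySem.Int.floordiv_mul_add_mod n 2
  have h2 := PySem.Int.mod_nonneg n (b := 2) (by omega)
  have h3 := PySem.Int.mod_lt n (b := 2) (by omega)
  omega

lemma block_getElem (a b c k : Nat) (hk : k < (List.replicate a (0:Int) ++ List.replicate b 1 ++ List.replicate c 0).length) :
    (List.replicate a (0:Int) ++ List.replicate b 1 ++ List.replicate c 0)[k]
      = if k < a then 0 else if k < a + b then 1 else 0 := by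
  simp only [List.length_append, List.length_replicate] at hk
  simp [List.getElem_append, List.getElem_replicate]
  split_ifs <;> first | rfl | omega

lemma length_tgZeroRow (n : Int) : (tgZeroRow n).length = n.toNat := by
  simp [tgZeroRow, PySem.List.length_pyRange_one]

lemma length_tgBrow (n i : Int) : (tgBrow n i).length
    = ((if i ≤ PySem.Int.floordiv n 2 then max 0 (PySem.Int.floordiv n 2 - i) else i - PySem.Int.floordiv n 2).toNat
       + (max 0 ((if i ≤ PySem.Int.floordiv n 2 then (i : Int) else n - 1 - (i - PySem.Int.floordiv n 2))
            - (if i ≤ PySem.Int.floordiv n 2 then max 0 (PySem.Int.floordiv n 2 - i) else i - PySem.Int.floordiv n 2) + 1)).toNat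
       + (n - (if i ≤ PySem.Int.floordiv n 2 then max 0 (PySem.Int.floordiv n 2 - i) else i - PySem.Int.floordiv n 2)
            - (max 0 ((if i ≤ PySem.Int.floordiv n 2 then (i : Int) else n - 1 - (i - PySem.Int.floordiv n 2))
            - (if i ≤ PySem.Int.floordiv n 2 then max 0 (PySem.Int.floordiv n 2 - i) else i - PySem.Int.floordiv n 2) + 1))).toNat) := by
  simp only [tgBrow]
  split_ifs <;> simp [List.length_append, List.length_replicate] <;> omega

lemma row_eq (n i : Int) (h0 : 0 ≤ i) (h1 : i < n) :
    tgRow n i (tgZeroRow n) = tgBrow n i := by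
  have hq := h_char n
  apply List.ext_getElem
  · unfold tgRow
    rw [length_rfold, length_tgZeroRow, length_tgBrow]
    split_ifs <;> omega
  · intro k h1k h2k
    unfold tgRow at h1k ⊢
    have hkz : k < (tgZeroRow n).length := by rw [length_rfold] at h1k; exact h1k
    have hkn : (k : Int) < n := by rw [length_tgZeroRow] at hkz; omega
    rw [rfold_getElem n i _ _ k hkz (fun j hm => ((PySem.List.mem_pyRange_one).mp hm).1)]
    have hmem : (k : Int) ∈ PySem.List.pyRange 0 n 1 := (PySem.List.mem_pyRange_one).mpr (by omega)
    have hz : (tgZeroRow n)[k]'hkz = 0 := by simp [tgZeroRow]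
    rw [hz]
    simp only [tgBrow]
    by_cases hbi : i ≤ PySem.Int.floordiv n 2
    · simp only [if_pos hbi]
      rw [block_getElem]
      simp only [hmem, true_and, tgC, Bool.or_eq_true, Bool.and_eq_true, decide_eq_true_eq]
      split_ifs <;> omega
    · simp only [if_neg hbi]
      rw [block_getElem]
      simp only [hmem, true_and, tgC, Bool.or_eq_true, Bool.and_eq_true, decide_eq_true_eq]
      split_ifs <;> omega

-- ===== VERDICT =====
theorem triangulo_spec : Claim_equal_triangulo := by
  intro n _
  unfold Spec_triangulo
  rw [triangulo_eq_fold, triangulo_alt_eq_map]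
  apply List.ext_getElem
  · rw [length_ofold]; simp
  · intro k h1k h2k
    have hx0 : ((PySem.List.pyRange 0 n 1).map
        (fun _ => (PySem.List.pyRange 0 n 1).map (fun _ => (0:Int)))).length
        = (PySem.List.pyRange 0 n 1).length := List.length_map _
    have hk0 : k < ((PySem.List.pyRange 0 n 1).map
        (fun _ => (PySem.List.pyRange 0 n 1).map (fun _ => (0:Int)))).length := by
      rw [length_ofold] at h1k; exact h1k
    have hkn : (k : Int) < n := by
      rw [hx0, PySem.List.length_pyRange_one] at hk0; omega
    rw [ofold_getElem n _ _ k hk0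
      (fun i hm => by
        constructor
        · exact ((PySem.List.mem_pyRange_one).mp hm).1
        · rw [hx0, PySem.List.length_pyRange_one]
          have := ((PySem.List.mem_pyRange_one).mp hm).2
          omega)
      (PySem.List.nodup_pyRange_one 0 n)]
    have hmem : (k : Int) ∈ PySem.List.pyRange 0 n 1 := (PySem.List.mem_pyRange_one).mpr (by omega)
    simp only [hmem, if_pos, List.getElem_map]
    have hzr : List.map (fun _ => (0:Int)) (PySem.List.pyRange 0 n 1) = tgZeroRow n := rfl
    rw [hzr, row_eq n (k : Int) (by omega) hkn]
    congr 1
    rw [PySem.List.getElem_pyRange_one]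
    omega
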